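-- pv_equiv track=rewrite | github.com/Safik121/Python-Related-Stuff | Python-Files-School/binary_search_position_list.py | binary_search_position_list
-- ===== SOURCE A (Python) =====
-- def binary_search_position_list(needle, haystack):
--     left_index, right_index = 0, len(haystack) - 1
--     positions = []
--
--     while left_index <= right_index:
--         mid_index = (left_index + right_index) // 2
--         if haystack[mid_index] == needle:
--             positions.append(mid_index)
--             left_neighbor = mid_index - 1
--             while left_neighbor >= 0 and haystack[left_neighbor] == needle:
--                 positions.append(left_neighbor)
--                 left_neighbor -= 1
--             right_neighbor = mid_index + 1
--             while right_neighbor < len(haystack) and haystack[right_neighbor] == needle: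
--                 positions.append(right_neighbor)
--                 right_neighbor += 1
--             return sorted(positions)
--         elif haystack[mid_index] < needle:
--             left_index = mid_index + 1
--         else:
--             right_index = mid_index - 1
--     return positions
-- ===== SOURCE B (Python) =====
-- def _lower_bound(needle, haystack):
--     # first index i with haystack[i] >= needle
--     lo, hi = 0, len(haystack)
--     while lo < hi:
--         mid = (lo + hi) // 2
--         if haystack[mid] < needle:
--             lo = mid + 1
--         else:
--             hi = mid
--     return lo
--
--
-- def _upper_bound(needle, haystack):
--     # first index i with haystack[i] > needle
--     lo, hi = 0, len(haystack)
--     while lo < hi: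
--         mid = (lo + hi) // 2
--         if needle < haystack[mid]:
--             hi = mid
--         else:
--             lo = mid + 1
--     return lo
--
--
-- def binary_search_position_list(needle, haystack):
--     return list(range(_lower_bound(needle, haystack),
--                       _upper_bound(needle, haystack)))
-- ===== Notes on version B (the rewrite author's own statement) =====
-- stated objective: alternative
-- what changed: Replaces the single binary search followed by linear left/right neighbor expansion and a final sort with two boundary binary searches (lower/upper bound) whose gap is emitted directly as list(range(lo, hi)); Pre_ excludes only unsorted haystacks that contain the needle, where a binary search's answer is an accident of the probed midpoints.
-- outside the precondition, e.g. on binary_search_position_list(1, [1, 0]): A returns [0], B returns []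
import Mathlib
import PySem

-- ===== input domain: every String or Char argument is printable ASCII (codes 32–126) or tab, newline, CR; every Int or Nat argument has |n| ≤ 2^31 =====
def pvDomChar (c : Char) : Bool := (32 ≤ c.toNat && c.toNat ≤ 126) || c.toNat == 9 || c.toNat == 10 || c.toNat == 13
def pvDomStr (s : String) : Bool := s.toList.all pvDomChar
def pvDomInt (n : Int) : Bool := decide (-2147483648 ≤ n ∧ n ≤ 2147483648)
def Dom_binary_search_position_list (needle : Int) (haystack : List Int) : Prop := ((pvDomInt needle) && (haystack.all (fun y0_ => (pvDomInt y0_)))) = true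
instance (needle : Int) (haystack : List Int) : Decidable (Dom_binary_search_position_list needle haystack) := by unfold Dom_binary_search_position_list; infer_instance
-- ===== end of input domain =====

-- B replaces A's binary search + linear neighbor expansion + sort with two boundary
-- binary searches (lower/upper bound) and emits the index range directly (objective: alternative).

-- ===== PORT A =====
-- inner 'while left_neighbor >= 0 and haystack[left_neighbor] == needle' loop
def bsplLeftScan (needle : Int) (haystack : List Int) (positions : List Int) (j : Int) : List Int :=
  if h : 0 ≤ j ∧ PySem.List.pyGetD haystack j 0 = needle then
    bsplLeftScan needle haystack (positions ++ [j]) (j - 1)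
  else positions
termination_by (j + 1).toNat
decreasing_by omega

-- inner 'while right_neighbor < len(haystack) and haystack[right_neighbor] == needle' loop
def bsplRightScan (needle : Int) (haystack : List Int) (positions : List Int) (j : Int) : List Int :=
  if h : j < (haystack.length : Int) ∧ PySem.List.pyGetD haystack j 0 = needle then
    bsplRightScan needle haystack (positions ++ [j]) (j + 1)
  else positions
termination_by ((haystack.length : Int) - j).toNat
decreasing_by omega

-- outer 'while left_index <= right_index' loop
def bsplLoop (needle : Int) (haystack : List Int) (l r : Int) : List Int :=
  if hlr : l ≤ r then
    let mid := PySem.Int.floordiv (l + r) 2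
    if PySem.List.pyGetD haystack mid 0 = needle then
      PySem.List.sorted
        (bsplRightScan needle haystack (bsplLeftScan needle haystack [mid] (mid - 1)) (mid + 1))
        (fun v => v)
    else if PySem.List.pyGetD haystack mid 0 < needle then
      bsplLoop needle haystack (mid + 1) r
    else
      bsplLoop needle haystack l (mid - 1)
  else []
termination_by (r - l + 1).toNat
decreasing_by
  · have := PySem.Int.floordiv_two_mid_bounds hlr; omega
  · have := PySem.Int.floordiv_two_mid_bounds hlr; omega

def binary_search_position_list (needle : Int) (haystack : List Int) : List Int :=
  bsplLoop needle haystack 0 ((haystack.length : Int) - 1)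

-- ===== PORT B =====
-- 'while lo < hi' loop of _lower_bound
def bsplLowerLoop (needle : Int) (haystack : List Int) (lo hi : Int) : Int :=
  if h : lo < hi then
    let mid := PySem.Int.floordiv (lo + hi) 2
    if PySem.List.pyGetD haystack mid 0 < needle then
      bsplLowerLoop needle haystack (mid + 1) hi
    else
      bsplLowerLoop needle haystack lo mid
  else lo
termination_by (hi - lo).toNat
decreasing_by
  · have h1 := (PySem.Int.le_floordiv_iff_mul_le (a := lo + hi) (b := 2) (q := lo) (by omega)).mpr (by omega)
    omega
  · have h2 := (PySem.Int.floordiv_lt_iff_lt_mul (a := lo + hi) (b := 2) (q := hi) (by omega)).mpr (by omega)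
    have h1 := (PySem.Int.le_floordiv_iff_mul_le (a := lo + hi) (b := 2) (q := lo) (by omega)).mpr (by omega)
    omega

-- 'while lo < hi' loop of _upper_bound
def bsplUpperLoop (needle : Int) (haystack : List Int) (lo hi : Int) : Int :=
  if h : lo < hi then
    let mid := PySem.Int.floordiv (lo + hi) 2
    if needle < PySem.List.pyGetD haystack mid 0 then
      bsplUpperLoop needle haystack lo mid
    else
      bsplUpperLoop needle haystack (mid + 1) hi
  else lo
termination_by (hi - lo).toNat
decreasing_by
  · have h2 := (PySem.Int.floordiv_lt_iff_lt_mul (a := lo + hi) (b := 2) (q := hi) (by omega)).mpr (by omega)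
    have h1 := (PySem.Int.le_floordiv_iff_mul_le (a := lo + hi) (b := 2) (q := lo) (by omega)).mpr (by omega)
    omega
  · have h1 := (PySem.Int.le_floordiv_iff_mul_le (a := lo + hi) (b := 2) (q := lo) (by omega)).mpr (by omega)
    omega

def binary_search_position_list_alt (needle : Int) (haystack : List Int) : List Int :=
  PySem.List.pyRange
    (bsplLowerLoop needle haystack 0 (haystack.length : Int))
    (bsplUpperLoop needle haystack 0 (haystack.length : Int)) 1

-- ===== PRECONDITION & SPEC =====
-- Pre_ excludes unsorted haystacks that do contain the needle: A is a binary search, whose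
-- contract presupposes a sorted list; on such input the index set A returns is an accident of
-- which midpoints the probe happens to visit, a value no caller would specify (both programs'
-- values are equally defensible on a meaningless input). Unsorted lists WITHOUT the needle
-- stay inside Pre_ (both programs return [] there, and that is proved).
def Pre_binary_search_position_list (needle : Int) (haystack : List Int) : Prop :=
  List.Pairwise (· ≤ ·) haystack ∨ needle ∉ haystack
instance (needle : Int) (haystack : List Int) : Decidable (Pre_binary_search_position_list needle haystack) := by unfold Pre_binary_search_position_list; infer_instance

def pvWitness_binary_search_position_list : Int × List Int := (2, [1, 2, 2, 3])

def Spec_binary_search_position_list (needle : Int) (haystack : List Int) (out : List Int) : Prop := out = binary_search_position_list_alt needle haystack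
instance (needle : Int) (haystack : List Int) (out : List Int) : Decidable (Spec_binary_search_position_list needle haystack out) := by unfold Spec_binary_search_position_list; infer_instance

-- ===== CLAIM (what is proved, stated in full; the proofs are below) =====
def Claim_equal_binary_search_position_list : Prop := ∀ (needle : Int) (haystack : List Int), Dom_binary_search_position_list needle haystack → Pre_binary_search_position_list needle haystack → Spec_binary_search_position_list needle haystack (binary_search_position_list needle haystack)

-- ===== LEMMAS AND PROOFS =====

theorem bspl_sorted_mono {haystack : List Int} (hs : List.Pairwise (· ≤ ·) haystack)
    {i j : Nat} (hj : j < haystack.length) (hij : i ≤ j) : haystack[i]'(by omega) ≤ haystack[j] := by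
  rcases Nat.lt_or_ge i j with h | h
  · exact List.pairwise_iff_getElem.mp hs i j (by omega) hj h
  · have : i = j := by omega
    subst this; exact le_refl _

-- lower-bound loop computes bisectLeft
theorem bsplLowerLoop_eq (needle : Int) (haystack : List Int)
    (hs : List.Pairwise (· ≤ ·) haystack) (lo hi : Int)
    (h0 : 0 ≤ lo) (hhi : hi ≤ (haystack.length : Int)) (hlh : lo ≤ hi)
    (hinv1 : ∀ (j : Nat) (hj : j < haystack.length), (j : Int) < lo → haystack[j] < needle)
    (hinv2 : ∀ (j : Nat) (hj : j < haystack.length), hi ≤ (j : Int) → needle ≤ haystack[j]) :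
    bsplLowerLoop needle haystack lo hi = (PySem.List.bisectLeft haystack needle : Int) := by
  obtain ⟨hl1, hl2, hl3⟩ := PySem.List.bisectLeft_spec haystack needle hs
  have main : ∀ (k : Nat) (lo hi : Int), (hi - lo).toNat ≤ k → 0 ≤ lo →
      hi ≤ (haystack.length : Int) → lo ≤ hi →
      (∀ (j : Nat) (hj : j < haystack.length), (j : Int) < lo → haystack[j] < needle) →
      (∀ (j : Nat) (hj : j < haystack.length), hi ≤ (j : Int) → needle ≤ haystack[j]) →
      bsplLowerLoop needle haystack lo hi = (PySem.List.bisectLeft haystack needle : Int) := by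
    intro k
    induction k with
    | zero =>
      intro lo hi hk h0 hhi hlh hinv1 hinv2
      have hEq : lo = hi := by omega
      rw [bsplLowerLoop, dif_neg (by omega)]
      subst hEq
      rcases lt_trichotomy lo ((PySem.List.bisectLeft haystack needle : Nat) : Int) with h | h | h
      · have hjn : lo.toNat < haystack.length := by omega
        have h1 := hl2 lo.toNat hjn (by omega)
        have h2 := hinv2 lo.toNat hjn (by omega)
        omega
      · exact h
      · have hjn : PySem.List.bisectLeft haystack needle < haystack.length := by omega
        have h1 := hinv1 _ hjn (by omega)
        have h2 := hl3 _ hjn (by omega)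
        omega
    | succ k ih =>
      intro lo hi hk h0 hhi hlh hinv1 hinv2
      rw [bsplLowerLoop]
      by_cases hlt : lo < hi
      · rw [dif_pos hlt]
        have hm1 : lo ≤ PySem.Int.floordiv (lo + hi) 2 :=
          (PySem.Int.le_floordiv_iff_mul_le (a := lo + hi) (b := 2) (q := lo) (by omega)).mpr (by omega)
        have hm2 : PySem.Int.floordiv (lo + hi) 2 < hi :=
          (PySem.Int.floordiv_lt_iff_lt_mul (a := lo + hi) (b := 2) (q := hi) (by omega)).mpr (by omega)
        set mid := PySem.Int.floordiv (lo + hi) 2 with hmid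
        have hmn : mid.toNat < haystack.length := by omega
        have hcast : (mid.toNat : Int) = mid := Int.toNat_of_nonneg (by omega)
        have hget : PySem.List.pyGetD haystack mid 0 = haystack[mid.toNat] := by
          exact PySem.List.pyGetD_eq_getElem haystack 0 (by omega) (by omega)
        by_cases hc : PySem.List.pyGetD haystack mid 0 < needle
        · rw [if_pos hc]
          refine ih (mid + 1) hi (by omega) (by omega) hhi (by omega) ?_ hinv2
          intro j hj hjlt
          have := bspl_sorted_mono hs hmn (show j ≤ mid.toNat by omega)
          rw [hget] at hc
          omega
        · rw [if_neg hc]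
          refine ih lo mid (by omega) h0 (by omega) (by omega) hinv1 ?_
          intro j hj hjge
          have := bspl_sorted_mono hs hj (show mid.toNat ≤ j by omega)
          rw [hget] at hc
          omega
      · rw [dif_neg hlt]
        have hEq : lo = hi := by omega
        subst hEq
        rcases lt_trichotomy lo ((PySem.List.bisectLeft haystack needle : Nat) : Int) with h | h | h
        · have hjn : lo.toNat < haystack.length := by omega
          have h1 := hl2 lo.toNat hjn (by omega)
          have h2 := hinv2 lo.toNat hjn (by omega)
          omega
        · exact h
        · have hjn : PySem.List.bisectLeft haystack needle < haystack.length := by omega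
          have h1 := hinv1 _ hjn (by omega)
          have h2 := hl3 _ hjn (by omega)
          omega
  exact main (hi - lo).toNat lo hi (by omega) h0 hhi hlh hinv1 hinv2

-- upper-bound loop computes bisectRight
theorem bsplUpperLoop_eq (needle : Int) (haystack : List Int)
    (hs : List.Pairwise (· ≤ ·) haystack) (lo hi : Int)
    (h0 : 0 ≤ lo) (hhi : hi ≤ (haystack.length : Int)) (hlh : lo ≤ hi)
    (hinv1 : ∀ (j : Nat) (hj : j < haystack.length), (j : Int) < lo → haystack[j] ≤ needle)
    (hinv2 : ∀ (j : Nat) (hj : j < haystack.length), hi ≤ (j : Int) → needle < haystack[j]) :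
    bsplUpperLoop needle haystack lo hi = (PySem.List.bisectRight haystack needle : Int) := by
  obtain ⟨hr1, hr2, hr3⟩ := PySem.List.bisectRight_spec haystack needle hs
  have main : ∀ (k : Nat) (lo hi : Int), (hi - lo).toNat ≤ k → 0 ≤ lo →
      hi ≤ (haystack.length : Int) → lo ≤ hi →
      (∀ (j : Nat) (hj : j < haystack.length), (j : Int) < lo → haystack[j] ≤ needle) →
      (∀ (j : Nat) (hj : j < haystack.length), hi ≤ (j : Int) → needle < haystack[j]) →
      bsplUpperLoop needle haystack lo hi = (PySem.List.bisectRight haystack needle : Int) := by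
    intro k
    induction k with
    | zero =>
      intro lo hi hk h0 hhi hlh hinv1 hinv2
      have hEq : lo = hi := by omega
      rw [bsplUpperLoop, dif_neg (by omega)]
      subst hEq
      rcases lt_trichotomy lo ((PySem.List.bisectRight haystack needle : Nat) : Int) with h | h | h
      · have hjn : lo.toNat < haystack.length := by omega
        have h1 := hr2 lo.toNat hjn (by omega)
        have h2 := hinv2 lo.toNat hjn (by omega)
        omega
      · exact h
      · have hjn : PySem.List.bisectRight haystack needle < haystack.length := by omega
        have h1 := hinv1 _ hjn (by omega)
        have h2 := hr3 _ hjn (by omega)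
        omega
    | succ k ih =>
      intro lo hi hk h0 hhi hlh hinv1 hinv2
      rw [bsplUpperLoop]
      by_cases hlt : lo < hi
      · rw [dif_pos hlt]
        have hm1 : lo ≤ PySem.Int.floordiv (lo + hi) 2 :=
          (PySem.Int.le_floordiv_iff_mul_le (a := lo + hi) (b := 2) (q := lo) (by omega)).mpr (by omega)
        have hm2 : PySem.Int.floordiv (lo + hi) 2 < hi :=
          (PySem.Int.floordiv_lt_iff_lt_mul (a := lo + hi) (b := 2) (q := hi) (by omega)).mpr (by omega)
        set mid := PySem.Int.floordiv (lo + hi) 2 with hmid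
        have hmn : mid.toNat < haystack.length := by omega
        have hcast : (mid.toNat : Int) = mid := Int.toNat_of_nonneg (by omega)
        have hget : PySem.List.pyGetD haystack mid 0 = haystack[mid.toNat] := by
          exact PySem.List.pyGetD_eq_getElem haystack 0 (by omega) (by omega)
        by_cases hc : needle < PySem.List.pyGetD haystack mid 0
        · rw [if_pos hc]
          refine ih lo mid (by omega) h0 (by omega) (by omega) hinv1 ?_
          intro j hj hjge
          have := bspl_sorted_mono hs hj (show mid.toNat ≤ j by omega)
          rw [hget] at hc
          omega
        · rw [if_neg hc]
          refine ih (mid + 1) hi (by omega) (by omega) hhi (by omega) ?_ hinv2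
          intro j hj hjlt
          have := bspl_sorted_mono hs hmn (show j ≤ mid.toNat by omega)
          rw [hget] at hc
          omega
      · rw [dif_neg hlt]
        have hEq : lo = hi := by omega
        subst hEq
        rcases lt_trichotomy lo ((PySem.List.bisectRight haystack needle : Nat) : Int) with h | h | h
        · have hjn : lo.toNat < haystack.length := by omega
          have h1 := hr2 lo.toNat hjn (by omega)
          have h2 := hinv2 lo.toNat hjn (by omega)
          omega
        · exact h
        · have hjn : PySem.List.bisectRight haystack needle < haystack.length := by omega
          have h1 := hinv1 _ hjn (by omega)
          have h2 := hr3 _ hjn (by omega)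
          omega
  exact main (hi - lo).toNat lo hi (by omega) h0 hhi hlh hinv1 hinv2

-- equality indices are exactly [bisectLeft, bisectRight)
theorem bspl_eq_iff (needle : Int) (haystack : List Int)
    (hs : List.Pairwise (· ≤ ·) haystack) (j : Nat) (hj : j < haystack.length) :
    haystack[j] = needle ↔
      PySem.List.bisectLeft haystack needle ≤ j ∧ j < PySem.List.bisectRight haystack needle := by
  obtain ⟨hl1, hl2, hl3⟩ := PySem.List.bisectLeft_spec haystack needle hs
  obtain ⟨hr1, hr2, hr3⟩ := PySem.List.bisectRight_spec haystack needle hs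
  constructor
  · intro he
    constructor
    · by_contra hlt
      exact absurd he (ne_of_lt (hl2 j hj (by omega)))
    · by_contra hge
      exact absurd he.symm (ne_of_lt (hr3 j hj (by omega)))
  · rintro ⟨h1, h2⟩
    exact le_antisymm (hr2 j hj h2) (hl3 j hj h1)

theorem bspl_lb_le_ub (needle : Int) (haystack : List Int)
    (hs : List.Pairwise (· ≤ ·) haystack) :
    PySem.List.bisectLeft haystack needle ≤ PySem.List.bisectRight haystack needle := by
  obtain ⟨hl1, hl2, hl3⟩ := PySem.List.bisectLeft_spec haystack needle hs
  obtain ⟨hr1, hr2, hr3⟩ := PySem.List.bisectRight_spec haystack needle hs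
  by_contra hlt
  have hub : PySem.List.bisectRight haystack needle < haystack.length := by omega
  have h1 := hl2 _ hub (by omega)
  have h2 := hr3 _ hub (by omega)
  omega

theorem bsplLeftScan_eq (needle : Int) (haystack : List Int)
    (hs : List.Pairwise (· ≤ ·) haystack) (acc : List Int) (j : Int)
    (hj : j < (PySem.List.bisectRight haystack needle : Int)) :
    bsplLeftScan needle haystack acc j
      = acc ++ PySem.List.pyRange j ((PySem.List.bisectLeft haystack needle : Int) - 1) (-1) := by
  have hub := (PySem.List.bisectRight_spec haystack needle hs).1
  have main : ∀ (k : Nat) (acc : List Int) (j : Int), (j + 1).toNat ≤ k →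
      j < (PySem.List.bisectRight haystack needle : Int) →
      bsplLeftScan needle haystack acc j
        = acc ++ PySem.List.pyRange j ((PySem.List.bisectLeft haystack needle : Int) - 1) (-1) := by
    intro k
    induction k with
    | zero =>
      intro acc j hk hj
      rw [bsplLeftScan, dif_neg (by rintro ⟨h1, -⟩; omega)]
      rw [PySem.List.pyRange_neg_one_eq_nil (by omega), List.append_nil]
    | succ k ih =>
      intro acc j hk hj
      by_cases hge : (PySem.List.bisectLeft haystack needle : Int) ≤ j
      · have hjn : j.toNat < haystack.length := by omega
        have hcast : (j.toNat : Int) = j := Int.toNat_of_nonneg (by omega)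
        have hget : PySem.List.pyGetD haystack j 0 = haystack[j.toNat] := by
          exact PySem.List.pyGetD_eq_getElem haystack 0 (by omega) (by omega)
        have hx : haystack[j.toNat] = needle :=
          (bspl_eq_iff needle haystack hs j.toNat hjn).mpr ⟨by omega, by omega⟩
        rw [bsplLeftScan, dif_pos ⟨by omega, by rw [hget]; exact hx⟩]
        rw [ih (acc ++ [j]) (j - 1) (by omega) (by omega)]
        rw [PySem.List.pyRange_neg_one_cons (show (PySem.List.bisectLeft haystack needle : Int) - 1 < j by omega)]
        simp
      · rw [bsplLeftScan]
        rw [dif_neg ?_]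
        · rw [PySem.List.pyRange_neg_one_eq_nil (by omega), List.append_nil]
        · rintro ⟨h1, hgetx⟩
          have hjn : j.toNat < haystack.length := by omega
          rw [PySem.List.pyGetD_eq_getElem haystack 0 (by omega) (by omega)] at hgetx
          have := ((bspl_eq_iff needle haystack hs j.toNat hjn).mp hgetx).1
          omega
  exact main (j + 1).toNat acc j (by omega) hj

theorem bsplRightScan_eq (needle : Int) (haystack : List Int)
    (hs : List.Pairwise (· ≤ ·) haystack) (acc : List Int) (j : Int)
    (hj : (PySem.List.bisectLeft haystack needle : Int) ≤ j) :
    bsplRightScan needle haystack acc j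
      = acc ++ PySem.List.pyRange j (PySem.List.bisectRight haystack needle : Int) 1 := by
  have hub := (PySem.List.bisectRight_spec haystack needle hs).1
  have hlb0 : 0 ≤ (PySem.List.bisectLeft haystack needle : Int) := by omega
  have main : ∀ (k : Nat) (acc : List Int) (j : Int), ((haystack.length : Int) - j).toNat ≤ k →
      (PySem.List.bisectLeft haystack needle : Int) ≤ j →
      bsplRightScan needle haystack acc j
        = acc ++ PySem.List.pyRange j (PySem.List.bisectRight haystack needle : Int) 1 := by
    intro k
    induction k with
    | zero =>
      intro acc j hk hj
      rw [bsplRightScan, dif_neg (by rintro ⟨h1, -⟩; omega)]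
      rw [PySem.List.pyRange_one_eq_nil (by omega), List.append_nil]
    | succ k ih =>
      intro acc j hk hj
      by_cases hlt : j < (PySem.List.bisectRight haystack needle : Int)
      · have hjn : j.toNat < haystack.length := by omega
        have hcast : (j.toNat : Int) = j := Int.toNat_of_nonneg (by omega)
        have hget : PySem.List.pyGetD haystack j 0 = haystack[j.toNat] := by
          exact PySem.List.pyGetD_eq_getElem haystack 0 (by omega) (by omega)
        have hx : haystack[j.toNat] = needle :=
          (bspl_eq_iff needle haystack hs j.toNat hjn).mpr ⟨by omega, by omega⟩
        rw [bsplRightScan, dif_pos ⟨by omega, by rw [hget]; exact hx⟩]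
        rw [ih (acc ++ [j]) (j + 1) (by omega) (by omega)]
        rw [PySem.List.pyRange_one_cons hlt]
        simp
      · rw [bsplRightScan]
        rw [dif_neg ?_]
        · rw [PySem.List.pyRange_one_eq_nil (by omega), List.append_nil]
        · rintro ⟨h1, hgetx⟩
          have hjn : j.toNat < haystack.length := by omega
          rw [PySem.List.pyGetD_eq_getElem haystack 0 (by omega) (by omega)] at hgetx
          have := ((bspl_eq_iff needle haystack hs j.toNat hjn).mp hgetx).2
          omega
  exact main ((haystack.length : Int) - j).toNat acc j (by omega) hj

theorem bsplLoop_eq (needle : Int) (haystack : List Int)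
    (hs : List.Pairwise (· ≤ ·) haystack) (l r : Int)
    (h0 : 0 ≤ l) (hr : r ≤ (haystack.length : Int) - 1)
    (hinv : ∀ (j : Nat) (hj : j < haystack.length), haystack[j] = needle → l ≤ (j : Int) ∧ (j : Int) ≤ r) :
    bsplLoop needle haystack l r
      = PySem.List.pyRange (PySem.List.bisectLeft haystack needle : Int)
          (PySem.List.bisectRight haystack needle : Int) 1 := by
  obtain ⟨hl1, hl2, hl3⟩ := PySem.List.bisectLeft_spec haystack needle hs
  obtain ⟨hr1, hr2, hr3⟩ := PySem.List.bisectRight_spec haystack needle hs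
  have hlbub := bspl_lb_le_ub needle haystack hs
  have main : ∀ (k : Nat) (l r : Int), (r - l + 1).toNat ≤ k → 0 ≤ l →
      r ≤ (haystack.length : Int) - 1 →
      (∀ (j : Nat) (hj : j < haystack.length), haystack[j] = needle → l ≤ (j : Int) ∧ (j : Int) ≤ r) →
      bsplLoop needle haystack l r
        = PySem.List.pyRange (PySem.List.bisectLeft haystack needle : Int)
            (PySem.List.bisectRight haystack needle : Int) 1 := by
    intro k
    induction k with
    | zero =>
      intro l r hk h0 hrlen hinv
      rw [bsplLoop, dif_neg (by omega)]
      have hnone : ¬ PySem.List.bisectLeft haystack needle < PySem.List.bisectRight haystack needle := by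
        intro hlt
        have hjn : PySem.List.bisectLeft haystack needle < haystack.length := by omega
        have hx : haystack[PySem.List.bisectLeft haystack needle] = needle :=
          (bspl_eq_iff needle haystack hs _ hjn).mpr ⟨by omega, by omega⟩
        have := hinv _ hjn hx
        omega
      rw [PySem.List.pyRange_one_eq_nil (by omega)]
    | succ k ih =>
      intro l r hk h0 hrlen hinv
      rw [bsplLoop]
      by_cases hlr : l ≤ r
      · rw [dif_pos hlr]
        obtain ⟨hm1, hm2⟩ := PySem.Int.floordiv_two_mid_bounds hlr
        set mid := PySem.Int.floordiv (l + r) 2 with hmid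
        have hmn : mid.toNat < haystack.length := by omega
        have hcast : (mid.toNat : Int) = mid := Int.toNat_of_nonneg (by omega)
        have hget : PySem.List.pyGetD haystack mid 0 = haystack[mid.toNat] := by
          exact PySem.List.pyGetD_eq_getElem haystack 0 (by omega) (by omega)
        by_cases hc : PySem.List.pyGetD haystack mid 0 = needle
        · rw [if_pos hc]
          rw [hget] at hc
          obtain ⟨hlbm, hmub⟩ := (bspl_eq_iff needle haystack hs mid.toNat hmn).mp hc
          rw [bsplLeftScan_eq needle haystack hs [mid] (mid - 1) (by omega)]
          rw [bsplRightScan_eq needle haystack hs _ (mid + 1) (by omega)]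
          apply PySem.List.sorted_eq_of_perm_of_pairwise_lt
          · -- Perm: pyRange lb ub ~ mid :: (descending-left ++ ascending-right)
            rw [PySem.List.pyRange_neg_one_eq_reverse (mid - 1) ((PySem.List.bisectLeft haystack needle : Int) - 1)]
            simp only [sub_add_cancel]
            rw [PySem.List.pyRange_one_append (PySem.List.bisectLeft haystack needle : Int) mid
                  (PySem.List.bisectRight haystack needle : Int) (by omega) (by omega),
                PySem.List.pyRange_one_cons (show mid < (PySem.List.bisectRight haystack needle : Int) by omega)]
            simp only [List.cons_append, List.nil_append]
            exact List.perm_middle.trans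
              (((List.reverse_perm _).symm.append_right _).cons mid)
          · simpa using PySem.List.pairwise_lt_pyRange_one
              (PySem.List.bisectLeft haystack needle : Int) (PySem.List.bisectRight haystack needle : Int)
        · rw [if_neg hc]
          rw [hget] at hc
          by_cases hlt : haystack[mid.toNat] < needle
          · rw [hget, if_pos hlt]
            have hmlb : (mid.toNat : Int) < (PySem.List.bisectLeft haystack needle : Int) := by
              by_contra hge
              have := hl3 mid.toNat hmn (by omega)
              omega
            refine ih (mid + 1) r (by omega) (by omega) hrlen ?_
            intro j hj hx
            obtain ⟨hlbj, hjub⟩ := (bspl_eq_iff needle haystack hs j hj).mp hx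
            have := (hinv j hj hx).2
            omega
          · rw [hget, if_neg hlt]
            have hubm : PySem.List.bisectRight haystack needle ≤ mid.toNat := by
              by_contra hge
              have := hr2 mid.toNat hmn (by omega)
              omega
            refine ih l (mid - 1) (by omega) h0 (by omega) ?_
            intro j hj hx
            obtain ⟨hlbj, hjub⟩ := (bspl_eq_iff needle haystack hs j hj).mp hx
            have := (hinv j hj hx).1
            omega
      · rw [dif_neg hlr]
        have hnone : ¬ PySem.List.bisectLeft haystack needle < PySem.List.bisectRight haystack needle := by
          intro hlt
          have hjn : PySem.List.bisectLeft haystack needle < haystack.length := by omega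
          have hx : haystack[PySem.List.bisectLeft haystack needle] = needle :=
            (bspl_eq_iff needle haystack hs _ hjn).mpr ⟨by omega, by omega⟩
          have := hinv _ hjn hx
          omega
        rw [PySem.List.pyRange_one_eq_nil (by omega)]
  exact main (r - l + 1).toNat l r (by omega) h0 hr hinv


-- needle absent: A's outer loop never takes the found branch
theorem bsplLoop_absent (needle : Int) (haystack : List Int)
    (habs : ∀ (j : Nat) (hj : j < haystack.length), haystack[j] ≠ needle) :
    ∀ (k : Nat) (l r : Int), (r - l + 1).toNat ≤ k → 0 ≤ l → r ≤ (haystack.length : Int) - 1 →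
      bsplLoop needle haystack l r = [] := by
  intro k
  induction k with
  | zero =>
    intro l r hk h0 hr
    rw [bsplLoop, dif_neg (by omega)]
  | succ k ih =>
    intro l r hk h0 hr
    rw [bsplLoop]
    by_cases hlr : l ≤ r
    · rw [dif_pos hlr]
      obtain ⟨hm1, hm2⟩ := PySem.Int.floordiv_two_mid_bounds hlr
      set mid := PySem.Int.floordiv (l + r) 2 with hmid
      have hmn : mid.toNat < haystack.length := by omega
      have hget : PySem.List.pyGetD haystack mid 0 = haystack[mid.toNat] := by
        exact PySem.List.pyGetD_eq_getElem haystack 0 (by omega) (by omega)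
      rw [if_neg (by rw [hget]; exact habs mid.toNat hmn)]
      by_cases hlt : PySem.List.pyGetD haystack mid 0 < needle
      · rw [if_pos hlt]
        exact ih (mid + 1) r (by omega) (by omega) hr
      · rw [if_neg hlt]
        exact ih l (mid - 1) (by omega) h0 (by omega)
    · rw [dif_neg hlr]

-- needle absent: B's two boundary loops take the same branch at every midpoint, so they agree
theorem bsplLowerLoop_absent_eq_upper (needle : Int) (haystack : List Int)
    (habs : ∀ (j : Nat) (hj : j < haystack.length), haystack[j] ≠ needle) :
    ∀ (k : Nat) (lo hi : Int), (hi - lo).toNat ≤ k → 0 ≤ lo → hi ≤ (haystack.length : Int) →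
      bsplLowerLoop needle haystack lo hi = bsplUpperLoop needle haystack lo hi := by
  intro k
  induction k with
  | zero =>
    intro lo hi hk h0 hhi
    rw [bsplLowerLoop, bsplUpperLoop, dif_neg (by omega), dif_neg (by omega)]
  | succ k ih =>
    intro lo hi hk h0 hhi
    by_cases hlt : lo < hi
    · rw [bsplLowerLoop, bsplUpperLoop, dif_pos hlt, dif_pos hlt]
      have hm1 : lo ≤ PySem.Int.floordiv (lo + hi) 2 :=
        (PySem.Int.le_floordiv_iff_mul_le (a := lo + hi) (b := 2) (q := lo) (by omega)).mpr (by omega)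
      have hm2 : PySem.Int.floordiv (lo + hi) 2 < hi :=
        (PySem.Int.floordiv_lt_iff_lt_mul (a := lo + hi) (b := 2) (q := hi) (by omega)).mpr (by omega)
      set mid := PySem.Int.floordiv (lo + hi) 2 with hmid
      have hmn : mid.toNat < haystack.length := by omega
      have hget : PySem.List.pyGetD haystack mid 0 = haystack[mid.toNat] := by
        exact PySem.List.pyGetD_eq_getElem haystack 0 (by omega) (by omega)
      have hne : PySem.List.pyGetD haystack mid 0 ≠ needle := by
        rw [hget]; exact habs mid.toNat hmn
      by_cases hc : PySem.List.pyGetD haystack mid 0 < needle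
      · rw [if_pos hc, if_neg (by omega)]
        exact ih (mid + 1) hi (by omega) (by omega) hhi
      · rw [if_neg hc, if_pos (by omega)]
        exact ih lo mid (by omega) h0 (by omega)
    · rw [bsplLowerLoop, bsplUpperLoop, dif_neg hlt, dif_neg hlt]

-- ===== VERDICT (by name: the statement is the Claim_ definition above) =====
theorem binary_search_position_list_spec : Claim_equal_binary_search_position_list := by
  intro needle haystack _ hpre
  unfold Spec_binary_search_position_list
  unfold binary_search_position_list binary_search_position_list_alt
  rcases hpre with hpre | habs
  case inr =>
    have habs' : ∀ (j : Nat) (hj : j < haystack.length), haystack[j] ≠ needle := by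
      intro j hj he
      exact habs (he ▸ List.getElem_mem hj)
    rw [bsplLoop_absent needle haystack habs' _ 0 ((haystack.length : Int) - 1)
          (le_refl _) (by omega) (by omega),
        bsplLowerLoop_absent_eq_upper needle haystack habs' _ 0 (haystack.length : Int)
          (le_refl _) (by omega) (by omega),
        PySem.List.pyRange_one_eq_nil (le_refl _)]
  rw [bsplLoop_eq needle haystack hpre 0 ((haystack.length : Int) - 1) (by omega) (by omega)
        (fun j hj _ => ⟨by omega, by omega⟩),
      bsplLowerLoop_eq needle haystack hpre 0 (haystack.length : Int) (by omega) (by omega)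
        (by omega) (fun j hj h => by omega) (fun j hj h => by omega),
      bsplUpperLoop_eq needle haystack hpre 0 (haystack.length : Int) (by omega) (by omega)
        (by omega) (fun j hj h => by omega) (fun j hj h => by omega)]
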